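-- pv_equiv track=rewrite | github.com/petarivanov95/SoftUni-Python-OOP-2023 | 03 - First Steps in OOP - Lab/01_rhombus.py | rhombus_stars
-- ===== SOURCE A (Python) =====
-- def rhombus_stars(number):
--     matrix = []  # Initializes an empty list to store the rows of the rhombus.
--     for row in range(number * 2 - 1):  # Iterates through the rows of the rhombus.
--         spaces = abs(number - row - 1)  # Calculates the number of spaces needed for the current row.
--         stars = number - spaces  # Calculates the number of stars needed for the current row.
--         row = ' ' * spaces + '* ' * stars  # Combines the spaces and stars to form the current row.
--         matrix.append(row)  # Adds the current row to the matrix.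
--
--     return matrix  # Returns the matrix of rows.
-- ===== SOURCE B (Python) =====
-- def rhombus_stars(number):
--     top = [' ' * (number - 1 - i) + '* ' * (i + 1) for i in range(number)]
--     return top + top[:-1][::-1]
-- ===== Notes on version B (the rewrite author's own statement) =====
-- stated objective: simpler
-- what changed: B builds only the top half of the rhombus directly and obtains the bottom half by reversing the top without its middle row, instead of A's single abs-based loop over every row.
import Mathlib
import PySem

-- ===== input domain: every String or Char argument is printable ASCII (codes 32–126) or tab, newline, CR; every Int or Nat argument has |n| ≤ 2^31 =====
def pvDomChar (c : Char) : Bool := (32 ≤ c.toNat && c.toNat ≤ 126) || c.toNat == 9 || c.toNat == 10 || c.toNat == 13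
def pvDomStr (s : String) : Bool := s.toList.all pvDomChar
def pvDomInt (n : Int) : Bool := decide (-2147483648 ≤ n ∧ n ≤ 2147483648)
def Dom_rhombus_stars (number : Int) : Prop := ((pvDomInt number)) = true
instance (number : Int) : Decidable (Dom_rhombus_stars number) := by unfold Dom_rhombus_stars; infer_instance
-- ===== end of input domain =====

-- B builds the top half of the rhombus and mirrors it (top + top[:-1][::-1]) instead of
-- A's single abs-based loop over every row; objective: simpler decomposition.


-- ===== PORT A =====
-- ' ' * k / '* ' * k are PySem.List.pyRepeat on the char lists (exact: Python's str*int).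
def pvRowStr (spaces stars : Int) : String :=
  String.ofList (PySem.List.pyRepeat [' '] spaces ++ PySem.List.pyRepeat ['*', ' '] stars)

def rhombus_stars (number : Int) : List String :=
  (PySem.List.pyRange 0 (number * 2 - 1) 1).foldl
    (fun matrix row =>
      let spaces := |number - row - 1|
      let stars := number - spaces
      matrix ++ [pvRowStr spaces stars]) []

-- ===== PORT B =====
-- top[:-1] is PySem.List.slice top none (some (-1)); [::-1] is reverse
-- (exact by PySem.List.slice?_none_none_neg_one).
def rhombus_stars_alt (number : Int) : List String :=
  let top := (PySem.List.pyRange 0 number 1).map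
    (fun i => pvRowStr (number - 1 - i) (i + 1))
  top ++ (PySem.List.slice top none (some (-1))).reverse

-- ===== PRECONDITION & SPEC =====
def Spec_rhombus_stars (number : Int) (out : List String) : Prop := out = rhombus_stars_alt number
instance (number : Int) (out : List String) : Decidable (Spec_rhombus_stars number out) := by unfold Spec_rhombus_stars; infer_instance

-- ===== CLAIM (what is proved, stated in full; the proofs are below) =====
def Claim_equal_rhombus_stars : Prop := ∀ (number : Int), Dom_rhombus_stars number → Spec_rhombus_stars number (rhombus_stars number)

-- ===== LEMMAS AND PROOFS =====

-- A's loop as a map over its range.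
theorem rhombus_a_eq_map (n : Int) :
    rhombus_stars n =
      (PySem.List.pyRange 0 (n * 2 - 1) 1).map (fun r => pvRowStr |n - r - 1| (n - |n - r - 1|)) := by
  unfold rhombus_stars
  rw [PySem.List.foldl_append_singleton_eq_map]
  simp

theorem rhombus_stars_spec_aux (n : Int) :
    rhombus_stars n = rhombus_stars_alt n := by
  rw [rhombus_a_eq_map]
  unfold rhombus_stars_alt
  by_cases hn : n ≤ 0
  · rw [PySem.List.pyRange_one_eq_nil (by omega), PySem.List.pyRange_one_eq_nil hn]
    simp [PySem.List.slice]
  · replace hn : 0 < n := by omega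
    -- split A's range at n
    rw [PySem.List.pyRange_one_append 0 n (n * 2 - 1) (by omega) (by omega), List.map_append]
    -- top half: |n - r - 1| = n - r - 1 for 0 ≤ r < n
    have htop : (PySem.List.pyRange 0 n 1).map (fun r => pvRowStr |n - r - 1| (n - |n - r - 1|))
        = (PySem.List.pyRange 0 n 1).map (fun i => pvRowStr (n - 1 - i) (i + 1)) := by
      apply List.map_congr_left
      intro r hr
      rw [PySem.List.mem_pyRange_one] at hr
      have habs : |n - r - 1| = n - r - 1 := abs_of_nonneg (by omega)
      rw [habs]
      congr 1 <;> omega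
    rw [htop]
    congr 1
    -- bottom half
    have hdrop : PySem.List.slice
        ((PySem.List.pyRange 0 n 1).map (fun i => pvRowStr (n - 1 - i) (i + 1))) none (some (-1))
        = ((PySem.List.pyRange 0 n 1).map (fun i => pvRowStr (n - 1 - i) (i + 1))).dropLast :=
      PySem.List.slice_to_neg_one _
    rw [hdrop]
    -- dropLast of the top = map over pyRange 0 (n-1)
    have hsplit : PySem.List.pyRange 0 n 1 = PySem.List.pyRange 0 (n - 1) 1 ++ [n - 1] := by
      have := PySem.List.pyRange_one_succ_right (a := 0) (b := n - 1) (by omega)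
      simpa using this
    rw [hsplit, List.map_append, List.map_cons, List.map_nil, List.dropLast_concat]
    -- both sides as maps over List.range (n-1).toNat
    rw [PySem.List.pyRange_one n (n * 2 - 1), PySem.List.pyRange_one 0 (n - 1)]
    have hlen : (n * 2 - 1 - n).toNat = (n - 1 - 0).toNat := by omega
    have hrev : (List.range (n - 1 - 0).toNat).reverse
        = List.map (fun x => (n - 1 - 0).toNat - 1 - x) (List.range (n - 1 - 0).toNat) := by
      rw [List.range_eq_range', List.reverse_range', ← List.range_eq_range']
      simp
    rw [hlen, List.map_map, List.map_map, ← List.map_reverse, hrev, List.map_map]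
    apply List.map_congr_left
    intro k hk
    rw [List.mem_range] at hk
    simp only [Function.comp]
    have hk' : (k : Int) < n - 1 := by omega
    have habs : |n - (n + (k : Int)) - 1| = (k : Int) + 1 := by
      rw [show n - (n + (k : Int)) - 1 = -((k : Int) + 1) by ring, abs_neg]
      exact abs_of_nonneg (by positivity)
    rw [habs]
    have : (0 : Int) + ((n - 1 - 0).toNat - 1 - k : Nat) = n - 2 - (k : Int) := by omega
    rw [this]
    congr 1 <;> omega

-- ===== VERDICT (by name: the statement is the Claim_ definition above) =====
theorem rhombus_stars_spec : Claim_equal_rhombus_stars := by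
  intro n _
  exact rhombus_stars_spec_aux n
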